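-- pv_equiv track=rewrite | github.com/namratha12-cloud/Eco_Themed_Farming_Platform | backend/routes/weather_routes.py | generate_climate_alerts
-- ===== SOURCE A (Python) =====
-- def generate_climate_alerts(forecast):
--     alerts = []
--
--     for day in forecast:
--         temp = day.get("temp", 0)
--         rain = day.get("rain", 0)
--         humidity = day.get("humidity", 0)
--         wind = day.get("wind", 0)
--
--         # Heavy rain / flood
--         if rain >= 80:
--             alerts.append({
--                 "type": "flood",
--                 "severity": "high",
--                 "title": "Heavy Rainfall Alert",
--                 "description": f"Expected rainfall of {rain} mm",
--                 "icon": "rain"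
--             })
--
--         # Heatwave
--         if temp >= 38:
--             alerts.append({
--                 "type": "heat",
--                 "severity": "medium",
--                 "title": "Heatwave Warning",
--                 "description": f"Temperature may reach {temp}°C",
--                 "icon": "sun"
--             })
--
--         # Drought conditions
--         if rain < 5 and humidity < 40:
--             alerts.append({
--                 "type": "drought",
--                 "severity": "low",
--                 "title": "Dry Spell Warning",
--                 "description": "Very low rainfall and low humidity expected",
--                 "icon": "tree"
--             })
--
--         # Strong winds
--         if wind > 40:
--             alerts.append({
--                 "type": "storm",
--                 "severity": "medium",
--                 "title": "Strong Wind Warning",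
--                 "description": f"Winds up to {wind} km/h expected",
--                 "icon": "wind"
--             })
--
--     return alerts
-- ===== SOURCE B (Python) =====
-- def generate_climate_alerts(forecast):
--     # Columnar approach: one pass per alert rule over the whole forecast,
--     # producing an Option column per rule; then a merge pass zips the four
--     # columns back into per-day order (flood, heat, drought, storm).
--     floods = [{"type": "flood", "severity": "high",
--                "title": "Heavy Rainfall Alert",
--                "description": f"Expected rainfall of {day.get('rain', 0)} mm",
--                "icon": "rain"}
--               if day.get("rain", 0) >= 80 else None
--               for day in forecast]
--     heats = [{"type": "heat", "severity": "medium",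
--               "title": "Heatwave Warning",
--               "description": f"Temperature may reach {day.get('temp', 0)}\u00b0C",
--               "icon": "sun"}
--              if day.get("temp", 0) >= 38 else None
--              for day in forecast]
--     droughts = [{"type": "drought", "severity": "low",
--                  "title": "Dry Spell Warning",
--                  "description": "Very low rainfall and low humidity expected",
--                  "icon": "tree"}
--                 if day.get("rain", 0) < 5 and day.get("humidity", 0) < 40 else None
--                 for day in forecast]
--     storms = [{"type": "storm", "severity": "medium",
--                "title": "Strong Wind Warning",
--                "description": f"Winds up to {day.get('wind', 0)} km/h expected",
--                "icon": "wind"}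
--               if day.get("wind", 0) > 40 else None
--               for day in forecast]
--     return [alert
--             for cols in zip(floods, heats, droughts, storms)
--             for alert in cols
--             if alert is not None]
-- ===== Notes on version B (the rewrite author's own statement) =====
-- stated objective: alternative
-- what changed: Replaces A's single per-day pass with a chain of if/append statements by four rule-outer column passes over the forecast (one Option column per alert type) that are then merged back into per-day order by a zip pass.
import Mathlib
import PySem

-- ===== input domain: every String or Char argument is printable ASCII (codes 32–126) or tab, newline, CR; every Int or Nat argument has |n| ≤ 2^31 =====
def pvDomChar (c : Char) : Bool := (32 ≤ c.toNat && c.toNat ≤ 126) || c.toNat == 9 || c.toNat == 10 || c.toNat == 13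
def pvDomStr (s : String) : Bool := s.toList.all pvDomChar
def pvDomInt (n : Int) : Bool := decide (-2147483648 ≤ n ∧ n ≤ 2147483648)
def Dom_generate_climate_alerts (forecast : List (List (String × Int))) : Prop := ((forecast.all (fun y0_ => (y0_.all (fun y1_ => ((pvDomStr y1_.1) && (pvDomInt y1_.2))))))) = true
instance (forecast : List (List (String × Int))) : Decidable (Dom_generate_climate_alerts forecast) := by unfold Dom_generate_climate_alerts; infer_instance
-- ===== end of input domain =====

-- B replaces A's single-pass per-day if/append accumulator by four rule-outer column
-- passes (one Option column per alert type) merged back into day order by a zip pass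
-- (objective: alternative decomposition, same cost).

-- ===== PORT A =====
-- A's loop body: extract the four fields, then the four if/append statements in order
def pvStepA (alerts : List (List (String × String))) (day : List (String × Int)) : List (List (String × String)) :=
  let temp := (PySem.Dict.mk day).getD "temp" 0
  let rain := (PySem.Dict.mk day).getD "rain" 0
  let humidity := (PySem.Dict.mk day).getD "humidity" 0
  let wind := (PySem.Dict.mk day).getD "wind" 0
  let alerts := if rain ≥ 80 then
      alerts ++ [[("type", "flood"), ("severity", "high"), ("title", "Heavy Rainfall Alert"),
        ("description", "Expected rainfall of " ++ PySem.Int.toStr rain ++ " mm"), ("icon", "rain")]]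
    else alerts
  let alerts := if temp ≥ 38 then
      alerts ++ [[("type", "heat"), ("severity", "medium"), ("title", "Heatwave Warning"),
        ("description", "Temperature may reach " ++ PySem.Int.toStr temp ++ "°C"), ("icon", "sun")]]
    else alerts
  let alerts := if rain < 5 ∧ humidity < 40 then
      alerts ++ [[("type", "drought"), ("severity", "low"), ("title", "Dry Spell Warning"),
        ("description", "Very low rainfall and low humidity expected"), ("icon", "tree")]]
    else alerts
  let alerts := if wind > 40 then
      alerts ++ [[("type", "storm"), ("severity", "medium"), ("title", "Strong Wind Warning"),
        ("description", "Winds up to " ++ PySem.Int.toStr wind ++ " km/h expected"), ("icon", "wind")]]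
    else alerts
  alerts

def generate_climate_alerts (forecast : List (List (String × Int))) : List (List (String × String)) :=
  forecast.foldl pvStepA []

-- ===== PORT B =====
-- one column per rule: Option alert per day
def pvColFlood (forecast : List (List (String × Int))) : List (Option (List (String × String))) :=
  forecast.map (fun day =>
    if (PySem.Dict.mk day).getD "rain" 0 ≥ 80 then
      some [("type", "flood"), ("severity", "high"), ("title", "Heavy Rainfall Alert"),
        ("description", "Expected rainfall of " ++ PySem.Int.toStr ((PySem.Dict.mk day).getD "rain" 0) ++ " mm"), ("icon", "rain")]
    else none)

def pvColHeat (forecast : List (List (String × Int))) : List (Option (List (String × String))) :=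
  forecast.map (fun day =>
    if (PySem.Dict.mk day).getD "temp" 0 ≥ 38 then
      some [("type", "heat"), ("severity", "medium"), ("title", "Heatwave Warning"),
        ("description", "Temperature may reach " ++ PySem.Int.toStr ((PySem.Dict.mk day).getD "temp" 0) ++ "°C"), ("icon", "sun")]
    else none)

def pvColDrought (forecast : List (List (String × Int))) : List (Option (List (String × String))) :=
  forecast.map (fun day =>
    if (PySem.Dict.mk day).getD "rain" 0 < 5 && (PySem.Dict.mk day).getD "humidity" 0 < 40 then
      some [("type", "drought"), ("severity", "low"), ("title", "Dry Spell Warning"),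
        ("description", "Very low rainfall and low humidity expected"), ("icon", "tree")]
    else none)

def pvColStorm (forecast : List (List (String × Int))) : List (Option (List (String × String))) :=
  forecast.map (fun day =>
    if (PySem.Dict.mk day).getD "wind" 0 > 40 then
      some [("type", "storm"), ("severity", "medium"), ("title", "Strong Wind Warning"),
        ("description", "Winds up to " ++ PySem.Int.toStr ((PySem.Dict.mk day).getD "wind" 0) ++ " km/h expected"), ("icon", "wind")]
    else none)

-- merge pass: zip the four columns and keep the present alerts in rule order per day
def generate_climate_alerts_alt (forecast : List (List (String × Int))) : List (List (String × String)) :=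
  (((pvColFlood forecast).zip ((pvColHeat forecast).zip ((pvColDrought forecast).zip (pvColStorm forecast)))).flatMap
    (fun cols => [cols.1, cols.2.1, cols.2.2.1, cols.2.2.2].filterMap id))

-- ===== PRECONDITION & SPEC =====
def Spec_generate_climate_alerts (forecast : List (List (String × Int))) (out : List (List (String × String))) : Prop := out = generate_climate_alerts_alt forecast
instance (forecast : List (List (String × Int))) (out : List (List (String × String))) : Decidable (Spec_generate_climate_alerts forecast out) := by unfold Spec_generate_climate_alerts; infer_instance

-- ===== CLAIM (what is proved, stated in full; the proofs are below) =====
def Claim_equal_generate_climate_alerts : Prop := ∀ (forecast : List (List (String × Int))), Dom_generate_climate_alerts forecast → Spec_generate_climate_alerts forecast (generate_climate_alerts forecast)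

-- ===== LEMMAS AND PROOFS =====

-- per-day agreement: A's if/append chain equals the merged four column entries for that day
theorem pv_step_eq (alerts : List (List (String × String))) (day : List (String × Int)) :
    pvStepA alerts day = alerts ++
      ([(pvColFlood [day]).headI, (pvColHeat [day]).headI, (pvColDrought [day]).headI,
        (pvColStorm [day]).headI].filterMap id) := by
  unfold pvStepA pvColFlood pvColHeat pvColDrought pvColStorm
  by_cases h1 : (80:Int) ≤ (PySem.Dict.mk day).getD "rain" 0 <;>
    by_cases h2 : (38:Int) ≤ (PySem.Dict.mk day).getD "temp" 0 <;>
      by_cases h3 : (PySem.Dict.mk day).getD "rain" 0 < 5 <;>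
        by_cases h4 : (PySem.Dict.mk day).getD "humidity" 0 < 40 <;>
          by_cases h5 : (40:Int) < (PySem.Dict.mk day).getD "wind" 0 <;>
            simp [h1, h2, h3, h4, h5, List.filterMap, List.headI]

theorem pv_fold_eq (forecast : List (List (String × Int))) (alerts : List (List (String × String))) :
    forecast.foldl pvStepA alerts = alerts ++ generate_climate_alerts_alt forecast := by
  induction forecast generalizing alerts with
  | nil => simp [generate_climate_alerts_alt, pvColFlood, pvColHeat, pvColDrought, pvColStorm]
  | cons day rest ih =>
      rw [List.foldl_cons, ih, pv_step_eq]
      simp only [generate_climate_alerts_alt, pvColFlood, pvColHeat, pvColDrought, pvColStorm,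
        List.map_cons, List.zip_cons_cons, List.flatMap_cons, List.map_nil, List.headI,
        List.append_assoc]

-- ===== VERDICT (by name: the statement is the Claim_ definition above) =====
theorem generate_climate_alerts_spec : Claim_equal_generate_climate_alerts := by
  intro forecast _
  unfold Spec_generate_climate_alerts generate_climate_alerts
  simpa using pv_fold_eq forecast []
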